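-- pv_equiv track=rewrite | github.com/Divya2010200/Python | strings1.py | swapcase1
-- ===== SOURCE A (Python) =====
-- def swapcase1(s):
--     n=""
--     for x in s:
--         if ord(x)>=65 and ord(x)<=90:
--             n+=chr(ord(x)+32)
--         elif ord(x)>=97 and ord(x)<=122:
--             n+=chr(ord(x)-32)
--         else:
--             n+=x
--     return n
-- ===== SOURCE B (Python) =====
-- def swapcase1(s):
--     table = {c: c + 32 for c in range(65, 91)}
--     table.update({c: c - 32 for c in range(97, 123)})
--     return s.translate(table)
-- ===== Notes on version B (the rewrite author's own statement) =====
-- stated objective: idiomatic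
-- what changed: Replaces the per-character if/elif branching and string concatenation with a precomputed code-point translation dict applied in one internal pass via str.translate (C-level loop instead of Python-level loop).
import Mathlib
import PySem

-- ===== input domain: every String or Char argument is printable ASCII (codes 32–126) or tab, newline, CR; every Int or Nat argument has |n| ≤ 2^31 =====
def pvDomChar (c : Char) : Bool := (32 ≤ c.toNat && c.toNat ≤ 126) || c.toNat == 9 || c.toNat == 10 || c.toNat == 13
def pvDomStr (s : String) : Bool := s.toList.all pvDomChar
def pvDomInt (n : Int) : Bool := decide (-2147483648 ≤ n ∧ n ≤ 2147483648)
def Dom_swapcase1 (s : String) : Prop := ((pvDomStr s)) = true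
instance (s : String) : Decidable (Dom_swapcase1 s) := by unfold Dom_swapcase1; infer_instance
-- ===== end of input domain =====

-- B replaces A's per-character if/elif chain with a precomputed translation table applied via str.translate (idiomatic).


-- ===== PORT A =====
-- literal port of A: build n by appending, per character, through the if/elif/else chain
def swapcase1 (s : String) : String :=
  String.mk (s.toList.foldl (fun n x =>
    if 65 ≤ x.toNat ∧ x.toNat ≤ 90 then n ++ [Char.ofNat (x.toNat + 32)]
    else if 97 ≤ x.toNat ∧ x.toNat ≤ 122 then n ++ [Char.ofNat (x.toNat - 32)]
    else n ++ [x]) [])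

-- ===== PORT B =====
-- the translation table: {c: c+32 for c in range(65,91)} then .update({c: c-32 for c in range(97,123)})
def swapTable : PySem.Dict Int Int :=
  ((PySem.List.pyRange 97 123 1).foldl (fun d c => d.insert c (c - 32))
    ((PySem.List.pyRange 65 91 1).foldl (fun d c => d.insert c (c + 32)) PySem.Dict.empty))

-- s.translate(table): each code point is replaced by its table value if present, kept otherwise
def swapcase1_alt (s : String) : String :=
  String.mk (s.toList.map (fun c =>
    match swapTable.get? (c.toNat : Int) with
    | some v => Char.ofNat v.toNat
    | none => c))

-- ===== PRECONDITION & SPEC =====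
def Spec_swapcase1 (s : String) (out : String) : Prop := out = swapcase1_alt s
instance (s : String) (out : String) : Decidable (Spec_swapcase1 s out) := by unfold Spec_swapcase1; infer_instance

-- ===== CLAIM (what is proved, stated in full; the proofs are below) =====
def Claim_equal_swapcase1 : Prop := ∀ (s : String), Dom_swapcase1 s → Spec_swapcase1 s (swapcase1 s)

-- ===== LEMMAS AND PROOFS =====
def aStep (x : Char) : Char :=
  if 65 ≤ x.toNat ∧ x.toNat ≤ 90 then Char.ofNat (x.toNat + 32)
  else if 97 ≤ x.toNat ∧ x.toNat ≤ 122 then Char.ofNat (x.toNat - 32)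
  else x

def bStep (c : Char) : Char :=
  match swapTable.get? (c.toNat : Int) with
  | some v => Char.ofNat v.toNat
  | none => c

set_option maxRecDepth 20000 in
theorem step_eq_of_dom : ∀ n : Fin 127, aStep (Char.ofNat n.val) = bStep (Char.ofNat n.val) := by
  decide

theorem step_eq (c : Char) (h : pvDomChar c = true) : aStep c = bStep c := by
  have hlt : c.toNat < 127 := by
    have h' : ((32 ≤ c.toNat ∧ c.toNat ≤ 126 ∨ c.toNat = 9) ∨ c.toNat = 10) ∨ c.toNat = 13 := by
      simpa [pvDomChar] using h
    omega
  have := step_eq_of_dom ⟨c.toNat, hlt⟩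
  set_option maxRecDepth 20000 in
  simpa [Char.ofNat_toNat] using this

set_option maxRecDepth 20000 in
theorem swapcase1_spec : Claim_equal_swapcase1 := by
  intro s hd
  unfold Spec_swapcase1 swapcase1 swapcase1_alt
  have hfun : (fun (n : List Char) (x : Char) =>
      if 65 ≤ x.toNat ∧ x.toNat ≤ 90 then n ++ [Char.ofNat (x.toNat + 32)]
      else if 97 ≤ x.toNat ∧ x.toNat ≤ 122 then n ++ [Char.ofNat (x.toNat - 32)]
      else n ++ [x]) = (fun n x => n ++ [aStep x]) := by
    funext n x
    simp only [aStep]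
    split_ifs <;> rfl
  rw [hfun, PySem.List.foldl_append_singleton_eq_map]
  have hmap : s.toList.map aStep = s.toList.map (fun c =>
      match swapTable.get? (c.toNat : Int) with
      | some v => Char.ofNat v.toNat
      | none => c) := by
    apply List.map_congr_left
    intro c hc
    exact step_eq c (by
      have := hd
      unfold Dom_swapcase1 pvDomStr at this
      exact List.all_eq_true.mp this c hc)
  rw [List.nil_append, hmap]
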